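-- pv_equiv track=rewrite | github.com/autogluon/tabrepo | tabrepo/simulation/ensemble_selection_config_scorer.py | _get_models_filtered_idx
-- ===== SOURCE A (Python) =====
-- from typing import Dict, List, Optional, Tuple, Type, Union, TYPE_CHECKING
--
-- def _get_models_filtered_idx(models: list[str], models_filtered: list[str]) -> Tuple[list[str], list[int]]:
--     """
--     Returns the filtered list of models and the index mapping of the filtered models to the original `models` list.
--     """
--     models_filtered_set = set(models_filtered)
--
--     # Preserve `models` order without duplicates (optimized)
--     models_seen = set()
--     # not (m in models_seen or models_seen.add(m) only adds `m` to models_seen if `m` was not already in models_seen.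
--     models_filtered = [m for m in models if (m in models_filtered_set) and not (m in models_seen or models_seen.add(m))]
--
--     if len(models_filtered_set) < len(models_filtered):
--         # Duplicate names in `models`, have special handling
--         models_idx = {}
--         for i, m in enumerate(models):
--             if m not in models_idx:
--                 models_idx[m] = []
--             models_idx[m].append(i)
--         models_filtered_idx = [models_idx[m].pop(0) for m in models_filtered]
--     else:
--         models_filtered_idx = [models.index(m) for m in models_filtered]
--     return models_filtered, models_filtered_idx
-- ===== SOURCE B (Python) =====
-- from typing import Tuple
--
-- def _get_models_filtered_idx(models: list[str], models_filtered: list[str]) -> Tuple[list[str], list[int]]: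
--     """Single pass over `models`: emit each first occurrence that is in
--     `models_filtered`, together with its index, in one traversal."""
--     models_filtered_set = set(models_filtered)
--     seen = set()
--     out_models = []
--     out_idx = []
--     for i, m in enumerate(models):
--         if m in models_filtered_set and m not in seen:
--             seen.add(m)
--             out_models.append(m)
--             out_idx.append(i)
--     return out_models, out_idx
-- ===== Notes on version B (the rewrite author's own statement) =====
-- stated objective: faster
-- what changed: One pass over models builds the deduplicated filtered list and its index list together (recording the index at the first qualifying occurrence), instead of A's comprehension followed by a second pass doing a repeated models.index scan, and drops A's never-taken duplicate-handling branch.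
import Mathlib
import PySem

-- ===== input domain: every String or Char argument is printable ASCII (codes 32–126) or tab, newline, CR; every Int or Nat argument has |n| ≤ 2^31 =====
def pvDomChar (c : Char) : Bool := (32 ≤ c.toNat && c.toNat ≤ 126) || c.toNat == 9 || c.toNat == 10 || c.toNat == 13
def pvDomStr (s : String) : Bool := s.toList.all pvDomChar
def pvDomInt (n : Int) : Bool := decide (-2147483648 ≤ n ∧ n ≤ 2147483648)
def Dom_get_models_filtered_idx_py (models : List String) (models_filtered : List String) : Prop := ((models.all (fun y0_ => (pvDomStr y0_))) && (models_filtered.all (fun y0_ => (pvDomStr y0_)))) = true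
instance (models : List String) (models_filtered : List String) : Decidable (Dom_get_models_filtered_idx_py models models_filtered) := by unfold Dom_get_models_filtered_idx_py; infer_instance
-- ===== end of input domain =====

-- B builds the filtered list and its index list in one pass (recording the index at the first
-- qualifying occurrence) instead of A's comprehension followed by repeated models.index scans.

-- ===== PORT A =====
-- models.index(m) is ported as index? with getD 0: every m in the comprehension's output occurs
-- in models, so index? is always `some` there (ValueError is unreachable); likewise the lookup and
-- pop(0) in the duplicate branch (that branch is proved unreachable below) use getD defaults.
def get_models_filtered_idx_py (models : List String) (models_filtered : List String) : List String × List Int :=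
  let models_filtered_set : PySem.Set String := PySem.Set.ofList models_filtered
  -- [m for m in models if (m in models_filtered_set) and not (m in models_seen or models_seen.add(m))]
  let st := models.foldl
    (fun (st : PySem.Set String × List String) m =>
      if PySem.Set.contains models_filtered_set m && !PySem.Set.contains st.1 m
      then (PySem.Set.add st.1 m, st.2 ++ [m]) else st)
    (PySem.Set.empty, [])
  let models_filtered2 := st.2
  if PySem.Set.len models_filtered_set < models_filtered2.length then
    -- duplicate handling: models_idx maps each model to its list of indices, popped front-first
    let models_idx := (PySem.List.enumerate models 0).foldl
      (fun (d : PySem.Dict String (List Int)) p =>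
        let d := if d.contains p.2 then d else d.insert p.2 []
        d.modify p.2 [] (fun l => l ++ [p.1]))
      PySem.Dict.empty
    let r := models_filtered2.foldl
      (fun (st : PySem.Dict String (List Int) × List Int) m =>
        let l := st.1.getD m []
        (st.1.insert m l.tail, st.2 ++ [l.headD 0]))
      (models_idx, [])
    (models_filtered2, r.2)
  else
    (models_filtered2, models_filtered2.map (fun m => (((PySem.List.index? models m).getD 0 : Nat) : Int)))

-- ===== PORT B =====
def get_models_filtered_idx_py_alt (models : List String) (models_filtered : List String) : List String × List Int :=
  let models_filtered_set : PySem.Set String := PySem.Set.ofList models_filtered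
  let st := (PySem.List.enumerate models 0).foldl
    (fun (st : PySem.Set String × List String × List Int) p =>
      if PySem.Set.contains models_filtered_set p.2 && !PySem.Set.contains st.1 p.2
      then (PySem.Set.add st.1 p.2, st.2.1 ++ [p.2], st.2.2 ++ [p.1])
      else st)
    (PySem.Set.empty, [], [])
  (st.2.1, st.2.2)

-- ===== PRECONDITION & SPEC =====
def Spec_get_models_filtered_idx_py (models : List String) (models_filtered : List String) (out : List String × List Int) : Prop := out = get_models_filtered_idx_py_alt models models_filtered
instance (models : List String) (models_filtered : List String) (out : List String × List Int) : Decidable (Spec_get_models_filtered_idx_py models models_filtered out) := by unfold Spec_get_models_filtered_idx_py; infer_instance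

-- ===== CLAIM (what is proved, stated in full; the proofs are below) =====
def Claim_equal_get_models_filtered_idx_py : Prop := ∀ (models : List String) (models_filtered : List String), Dom_get_models_filtered_idx_py models models_filtered → Spec_get_models_filtered_idx_py models models_filtered (get_models_filtered_idx_py models models_filtered)

-- ===== LEMMAS AND PROOFS =====

-- the common sequence of (index, model) pairs both loops emit
def pvNew (mfset : PySem.Set String) : PySem.Set String → List (Int × String) → List (Int × String)
  | _, [] => []
  | seen, p :: rest =>
    if PySem.Set.contains mfset p.2 && !PySem.Set.contains seen p.2
    then p :: pvNew mfset (PySem.Set.add seen p.2) rest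
    else pvNew mfset seen rest

theorem pvAfold (mfset : PySem.Set String) (rest : List String) :
    ∀ (seen : PySem.Set String) (acc : List String) (k : Int),
    (rest.foldl
      (fun (st : PySem.Set String × List String) m =>
        if PySem.Set.contains mfset m && !PySem.Set.contains st.1 m
        then (PySem.Set.add st.1 m, st.2 ++ [m]) else st)
      (seen, acc)).2
      = acc ++ (pvNew mfset seen (PySem.List.enumerate rest k)).map (·.2) := by
  induction rest with
  | nil => intro seen acc k; simp [pvNew, PySem.List.enumerate_nil]
  | cons m rest ih =>
    intro seen acc k
    rw [PySem.List.enumerate_cons]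
    by_cases h : (PySem.Set.contains mfset m && !PySem.Set.contains seen m) = true
    · simp only [List.foldl_cons, pvNew, h, if_pos, List.map_cons]
      rw [ih _ _ (k + 1)]
      simp
    · simp only [List.foldl_cons, pvNew, h, if_neg, Bool.false_eq_true, not_false_iff]
      rw [ih _ _ (k + 1)]

theorem pvBfold (mfset : PySem.Set String) (prs : List (Int × String)) :
    ∀ (seen : PySem.Set String) (accm : List String) (acci : List Int),
    (prs.foldl
      (fun (st : PySem.Set String × List String × List Int) p =>
        if PySem.Set.contains mfset p.2 && !PySem.Set.contains st.1 p.2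
        then (PySem.Set.add st.1 p.2, st.2.1 ++ [p.2], st.2.2 ++ [p.1])
        else st)
      (seen, accm, acci)).2
      = (accm ++ (pvNew mfset seen prs).map (·.2), acci ++ (pvNew mfset seen prs).map (·.1)) := by
  induction prs with
  | nil => intro seen accm acci; simp [pvNew]
  | cons p rest ih =>
    intro seen accm acci
    by_cases h : (PySem.Set.contains mfset p.2 && !PySem.Set.contains seen p.2) = true
    · simp only [List.foldl_cons, pvNew, h, if_pos, List.map_cons]
      rw [ih]
      simp
    · simp only [List.foldl_cons, pvNew, h, if_neg, Bool.false_eq_true, not_false_iff]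
      rw [ih]

theorem pvIndex?_append_of_not_mem (v : String) (t : List String) :
    ∀ (pre : List String), v ∉ pre →
    PySem.List.index? (pre ++ t) v = (PySem.List.index? t v).map (· + pre.length) := by
  intro pre
  induction pre with
  | nil => intro _; simp
  | cons x pre ih =>
    intro hv
    have hx : x ≠ v := fun h => hv (h ▸ List.mem_cons_self)
    rw [List.cons_append, PySem.List.index?_cons_of_ne _ hx,
      ih (fun h => hv (List.mem_cons_of_mem _ h))]
    cases PySem.List.index? t v
    · simp
    · simp
      omega

-- each emitted index is the first occurrence of its model in the full list
theorem pvNew_fst_eq_index (mfset : PySem.Set String) (rest : List String) :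
    ∀ (pre : List String) (seen : PySem.Set String),
    (∀ m, PySem.Set.contains seen m = true ↔ (m ∈ pre ∧ PySem.Set.contains mfset m = true)) →
    (pvNew mfset seen (PySem.List.enumerate rest (pre.length : Int))).map (·.1)
      = (pvNew mfset seen (PySem.List.enumerate rest (pre.length : Int))).map
          (fun p => (((PySem.List.index? (pre ++ rest) p.2).getD 0 : Nat) : Int)) := by
  induction rest with
  | nil => intro pre seen _; simp [pvNew, PySem.List.enumerate_nil]
  | cons m rest ih =>
    intro pre seen hinv
    rw [PySem.List.enumerate_cons]
    by_cases h : (PySem.Set.contains mfset m && !PySem.Set.contains seen m) = true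
    · have hm : PySem.Set.contains mfset m = true := (Bool.and_eq_true ..).mp h |>.1
      have hns : ¬ PySem.Set.contains seen m = true := by
        have := (Bool.and_eq_true ..).mp h |>.2; simp at this; simp [this]
      have hmp : m ∉ pre := fun hmem => hns ((hinv m).mpr ⟨hmem, hm⟩)
      have hidx : PySem.List.index? (pre ++ m :: rest) m = some pre.length := by
        rw [pvIndex?_append_of_not_mem m (m :: rest) pre hmp, PySem.List.index?_cons_self]
        simp
      simp only [pvNew, h, if_pos, List.map_cons]
      have hinv' : ∀ x, PySem.Set.contains (PySem.Set.add seen m) x = true ↔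
          (x ∈ pre ++ [m] ∧ PySem.Set.contains mfset x = true) := by
        intro x
        rw [PySem.Set.contains_iff, PySem.Set.mem_add]
        constructor
        · rintro (hx | rfl)
          · have := (hinv x).mp (PySem.Set.contains_iff .. |>.mpr hx)
            exact ⟨List.mem_append_left _ this.1, this.2⟩
          · exact ⟨List.mem_append_right _ List.mem_cons_self, hm⟩
        · rintro ⟨hx, hfx⟩
          rcases List.mem_append.mp hx with hx | hx
          · exact Or.inl (PySem.Set.contains_iff .. |>.mp ((hinv x).mpr ⟨hx, hfx⟩))
          · simp at hx; exact Or.inr hx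
      have hrec := ih (pre ++ [m]) (PySem.Set.add seen m) hinv'
      simp only [List.length_append, List.length_cons, List.length_nil, Nat.zero_add,
        List.append_assoc, List.singleton_append] at hrec
      push_cast at hrec
      rw [hidx, List.cons_eq_cons]
      exact ⟨rfl, hrec⟩
    · simp only [pvNew, h, if_neg, Bool.false_eq_true, not_false_iff]
      have hinv' : ∀ x, PySem.Set.contains seen x = true ↔
          (x ∈ pre ++ [m] ∧ PySem.Set.contains mfset x = true) := by
        intro x
        rw [hinv x]
        constructor
        · rintro ⟨hx, hfx⟩; exact ⟨List.mem_append_left _ hx, hfx⟩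
        · rintro ⟨hx, hfx⟩
          rcases List.mem_append.mp hx with hx | hx
          · exact ⟨hx, hfx⟩
          · simp at hx
            subst hx
            have hseen : PySem.Set.contains seen x = true := by
              by_contra hns
              apply h
              simp only [Bool.and_eq_true, Bool.not_eq_true', hfx, true_and]
              exact Bool.eq_false_iff.mpr hns
            exact (hinv x).mp hseen
      have hrec := ih (pre ++ [m]) seen hinv'
      simp only [List.length_append, List.length_cons, List.length_nil, Nat.zero_add,
        List.append_assoc, List.singleton_append] at hrec
      push_cast at hrec
      exact hrec

theorem pvNew_snd_props (mfset : PySem.Set String) (prs : List (Int × String)) :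
    ∀ (seen : PySem.Set String),
    (∀ m ∈ (pvNew mfset seen prs).map (·.2), PySem.Set.contains mfset m = true ∧ m ∉ seen)
    ∧ ((pvNew mfset seen prs).map (·.2)).Nodup := by
  induction prs with
  | nil => intro seen; simp [pvNew]
  | cons p rest ih =>
    intro seen
    by_cases h : (PySem.Set.contains mfset p.2 && !PySem.Set.contains seen p.2) = true
    · have hm : PySem.Set.contains mfset p.2 = true := (Bool.and_eq_true ..).mp h |>.1
      have hns : p.2 ∉ seen := by
        have := (Bool.and_eq_true ..).mp h |>.2
        simp only [Bool.not_eq_true'] at this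
        intro hmem
        rw [PySem.Set.contains_iff .. |>.mpr hmem] at this
        exact absurd this (by simp)
      obtain ⟨ihmem, ihnd⟩ := ih (PySem.Set.add seen p.2)
      simp only [pvNew, h, if_pos, List.map_cons]
      constructor
      · intro m hmem
        rcases List.mem_cons.mp hmem with rfl | hmem
        · exact ⟨hm, hns⟩
        · obtain ⟨h1, h2⟩ := ihmem m hmem
          exact ⟨h1, fun hx => h2 (PySem.Set.mem_add .. |>.mpr (Or.inl hx))⟩
      · refine List.nodup_cons.mpr ⟨fun hmem => ?_, ihnd⟩
        exact (ihmem p.2 hmem).2 (PySem.Set.mem_add .. |>.mpr (Or.inr rfl))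
    · simp only [pvNew, h, if_neg, Bool.false_eq_true, not_false_iff]
      exact ih seen

-- ===== VERDICT (by name: the statement is the Claim_ definition above) =====
theorem get_models_filtered_idx_py_spec : Claim_equal_get_models_filtered_idx_py := by
  intro models models_filtered _
  unfold Spec_get_models_filtered_idx_py get_models_filtered_idx_py get_models_filtered_idx_py_alt
  set mfset := PySem.Set.ofList models_filtered with hmf
  simp only []
  rw [pvBfold mfset (PySem.List.enumerate models 0) PySem.Set.empty [] []]
  have hA := pvAfold mfset models PySem.Set.empty [] 0
  rw [hA]
  simp only [List.nil_append]
  set prs := PySem.List.enumerate models 0 with hprs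
  set names := (pvNew mfset PySem.Set.empty prs).map (·.2) with hnames
  -- branch condition is false: names is nodup with members in mfset
  have hprops := pvNew_snd_props mfset prs PySem.Set.empty
  have hlen : names.length ≤ PySem.Set.len mfset := by
    have hsub : names ⊆ mfset := by
      intro m hm
      exact PySem.Set.contains_iff .. |>.mp (hprops.1 m hm).1
    have hle := (List.subperm_of_subset hprops.2 hsub).length_le
    rw [hnames]
    simpa [PySem.Set.len] using hle
  rw [if_neg (by omega)]
  -- indices: map fst = map (index into models)
  have hinv : ∀ m, PySem.Set.contains (PySem.Set.empty : PySem.Set String) m = true ↔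
      (m ∈ ([] : List String) ∧ PySem.Set.contains mfset m = true) := by
    intro m; simp [PySem.Set.empty, PySem.Set.contains]
  have hfst := pvNew_fst_eq_index mfset models [] PySem.Set.empty hinv
  simp only [List.length_nil, Nat.cast_zero, List.nil_append] at hfst
  refine Prod.ext rfl ?_
  simp only []
  rw [← hprs] at hfst
  rw [hfst, hnames, List.map_map]
  rfl
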